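-- pv_equiv track=rewrite | github.com/abhiz123/interview-questions-main | fuzzy_phrases/solution.py | phrasel_search
-- ===== SOURCE A (Python) =====
-- def phrasel_search(P, Queries):
--     # Write your solution here
--     phrase_list = []
--
--     for p in P:
--         split = p.split()
--         phrase_list.append(split)
--
--     ans = []
--
--     for q in Queries:
--         temp = []
--         words = q.split()
--
--         for p in P:
--             sentence = p.split()
--             i, flag = 0, 0
--             j = 0
--             while j < len(words) and i < len(sentence):
--                 if i == 0:
--                     z = j
--                     flag = 0
--                 if words[j] == sentence[i]:
--                     if i == len(sentence)-1:
--                         i, flag = 0, 0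
--                         temp.append(' '.join(words[z:j+1]))
--                         j = z+1
--                         continue
--                     i += 1
--                     j += 1
--                 elif flag == 0:
--                     j += 1
--                     flag = 1
--                 else:
--                     i, flag = 0, 0
--                     j = z+1
--
--         ans.append(temp[:])
--
--     return ans
-- ===== SOURCE B (Python) =====
-- def phrasel_search(P, Queries):
--     ans = []
--     for q in Queries:
--         words = q.split()
--         temp = []
--         for p in P:
--             sentence = p.split()
--             if not sentence:
--                 continue
--             for z in range(len(words)):
--                 k, i, skipped = z, 0, False
--                 while i < len(sentence) and k < len(words):
--                     if words[k] == sentence[i]: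
--                         i += 1
--                         k += 1
--                     elif i > 0 and not skipped:
--                         skipped = True
--                         k += 1
--                     else:
--                         break
--                 if i == len(sentence):
--                     temp.append(' '.join(words[z:k]))
--         ans.append(temp)
--     return ans
-- ===== Notes on version B (the rewrite author's own statement) =====
-- stated objective: simpler
-- what changed: A runs one stateful scan per phrase whose word pointer rewinds via z and a flag reset at i==0; B loops explicitly over start positions and runs a bounded forward-only matcher (phrase index, one-skip flag) from each start, appending the span on success.
import Mathlib
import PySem

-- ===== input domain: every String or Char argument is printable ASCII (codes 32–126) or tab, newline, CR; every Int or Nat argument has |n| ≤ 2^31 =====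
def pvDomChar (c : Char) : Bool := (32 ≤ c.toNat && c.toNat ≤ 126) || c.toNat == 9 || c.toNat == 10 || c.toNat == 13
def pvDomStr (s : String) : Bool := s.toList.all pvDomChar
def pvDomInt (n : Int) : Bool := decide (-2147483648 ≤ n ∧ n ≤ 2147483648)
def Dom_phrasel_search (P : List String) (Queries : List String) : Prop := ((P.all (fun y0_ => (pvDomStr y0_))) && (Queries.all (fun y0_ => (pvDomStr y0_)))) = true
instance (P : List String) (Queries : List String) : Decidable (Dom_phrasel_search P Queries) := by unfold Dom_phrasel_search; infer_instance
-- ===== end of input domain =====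

-- B replaces A's single stateful scan (pointer rewinds via z, a flag reset at i==0) by an
-- explicit loop over start positions with a bounded forward-only matcher; objective: simpler.

-- ===== PORT A =====
-- A's while loop; state (i, flag, j, z, temp) exactly as in the Python.
def pvLoopA (words sentence : List String) (i flag j z : Nat) (temp : List String) : List String :=
  if h : j < words.length ∧ i < sentence.length then
    -- 'if i == 0: z = j; flag = 0'
    let z' := if i = 0 then j else z
    let flag' := if i = 0 then 0 else flag
    if words.getD j "" = sentence.getD i "" then
      if i = sentence.length - 1 then
        pvLoopA words sentence 0 0 (z' + 1) z'
          (temp ++ [PySem.Str.join " " (PySem.List.slice words (some ((z' : Nat) : Int)) (some ((j + 1 : Nat) : Int)))])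
      else
        pvLoopA words sentence (i + 1) flag' (j + 1) z' temp
    else if flag' = 0 then
      pvLoopA words sentence i 1 (j + 1) z' temp
    else
      pvLoopA words sentence 0 0 (z' + 1) z' temp
  else temp
termination_by (words.length - (if i = 0 then j else z), words.length - j)
decreasing_by all_goals (by_cases hi : i = 0 <;> simp [Prod.lex_def, hi] <;> omega)

def phrasel_search (P : List String) (Queries : List String) : List (List String) :=
  let _phrase_list := P.map (fun p => PySem.Str.split₀ p)
  Queries.foldl (fun ans q =>
    let words := PySem.Str.split₀ q
    let temp := P.foldl (fun temp p => pvLoopA words (PySem.Str.split₀ p) 0 0 0 0 temp) []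
    ans ++ [temp]) []

-- ===== PORT B =====
-- Source B's inner while loop from one start: some k (one past the last matched word) iff the
-- whole phrase matched, none if it mismatched (skip already used or i == 0) or words ran out.
def pvMatchLoop (words sentence : List String) (k i : Nat) (skipped : Bool) : Option Nat :=
  if i < sentence.length then
    if k < words.length then
      if words.getD k "" = sentence.getD i "" then
        pvMatchLoop words sentence (k + 1) (i + 1) skipped
      else if 0 < i ∧ skipped = false then
        pvMatchLoop words sentence (k + 1) i true
      else none
    else none
  else some k
termination_by words.length - k
decreasing_by all_goals omega

-- body of Source B's 'for z in range(len(words))' loop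
def pvStepB (words sentence : List String) (temp : List String) (z : Nat) : List String :=
  match pvMatchLoop words sentence z 0 false with
  | some k => temp ++ [PySem.Str.join " " (PySem.List.slice words (some ((z : Nat) : Int)) (some ((k : Nat) : Int)))]
  | none => temp

def phrasel_search_alt (P : List String) (Queries : List String) : List (List String) :=
  Queries.foldl (fun ans q =>
    let words := PySem.Str.split₀ q
    let temp := P.foldl (fun temp p =>
      let sentence := PySem.Str.split₀ p
      if sentence = [] then temp
      else (List.range words.length).foldl (pvStepB words sentence) temp) []
    ans ++ [temp]) []

-- ===== PRECONDITION & SPEC =====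
def Spec_phrasel_search (P : List String) (Queries : List String) (out : List (List String)) : Prop := out = phrasel_search_alt P Queries
instance (P : List String) (Queries : List String) (out : List (List String)) : Decidable (Spec_phrasel_search P Queries out) := by unfold Spec_phrasel_search; infer_instance

-- ===== CLAIM (what is proved, stated in full; the proofs are below) =====
def Claim_equal_phrasel_search : Prop := ∀ (P : List String) (Queries : List String), Dom_phrasel_search P Queries → Spec_phrasel_search P Queries (phrasel_search P Queries)

-- ===== LEMMAS AND PROOFS =====

-- a successful match from k consumes at least the remaining phrase words and stays in bounds
lemma pvMatchLoop_bounds (words s : List String) :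
    ∀ (m k i : Nat) (sk : Bool) (k' : Nat), words.length - k ≤ m → k ≤ words.length →
      pvMatchLoop words s k i sk = some k' →
      k ≤ k' ∧ s.length - i ≤ k' - k ∧ k' ≤ words.length := by
  intro m
  induction m with
  | zero =>
    intro k i sk k' hm hk h
    rw [pvMatchLoop] at h
    by_cases hi : i < s.length
    · simp only [hi, if_pos] at h
      have : ¬ k < words.length := by omega
      simp [this] at h
    · simp only [hi, if_neg, if_false] at h
      simp at h
      omega
  | succ m ih =>
    intro k i sk k' hm hk h
    rw [pvMatchLoop] at h
    by_cases hi : i < s.length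
    · simp only [hi, if_pos] at h
      by_cases hkn : k < words.length
      · simp only [hkn, if_pos] at h
        by_cases hw : words.getD k "" = s.getD i ""
        · simp only [hw, if_pos] at h
          have := ih (k + 1) (i + 1) sk k' (by omega) (by omega) h
          omega
        · simp only [hw, if_neg, if_false] at h
          by_cases hc : 0 < i ∧ sk = false
          · simp only [hc, if_pos] at h
            have := ih (k + 1) i true k' (by omega) (by omega) h
            omega
          · simp [hc] at h
      · simp [hkn] at h
    · simp only [hi, if_neg, if_false] at h
      simp at h
      omega

-- no start z with fewer than |sentence| words left can succeed
lemma pvMatchLoop_none_of_short (words s : List String) (z : Nat)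
    (hz : z ≤ words.length) (hshort : words.length < z + s.length) :
    pvMatchLoop words s z 0 false = none := by
  cases h : pvMatchLoop words s z 0 false with
  | none => rfl
  | some k' =>
    have := pvMatchLoop_bounds words s (words.length - z) z 0 false k' (by omega) hz h
    omega

lemma foldl_pvStepB_none (words s : List String) :
    ∀ (l : List Nat) (temp : List String), (∀ z ∈ l, pvMatchLoop words s z 0 false = none) →
      l.foldl (pvStepB words s) temp = temp := by
  intro l
  induction l with
  | nil => intro temp _; rfl
  | cons x xs ih =>
    intro temp hall
    have hx := hall x (by simp)
    simp only [List.foldl_cons]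
    rw [show pvStepB words s temp x = temp by rw [pvStepB, hx]]
    exact ih temp (fun z hz => hall z (by simp [hz]))

-- correspondence between A's in-progress state (1 ≤ i, invariant j = z + i + flag) and
-- B's matcher; on exhaustion A stops outright and fewer than |s| words remain after z.
lemma pvLoopA_matchLoop (words s : List String) :
    ∀ (m i flag j z : Nat) (temp : List String), words.length - j ≤ m →
      1 ≤ i → i < s.length → flag ≤ 1 → j = z + i + flag →
      (match pvMatchLoop words s j i (decide (flag = 1)) with
       | some k => pvLoopA words s i flag j z temp =
           pvLoopA words s 0 0 (z + 1) z
             (temp ++ [PySem.Str.join " " (PySem.List.slice words (some ((z : Nat) : Int)) (some ((k : Nat) : Int)))])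
       | none => pvLoopA words s i flag j z temp = pvLoopA words s 0 0 (z + 1) z temp ∨
           (pvLoopA words s i flag j z temp = temp ∧ words.length ≤ z + s.length)) := by
  intro m
  induction m with
  | zero =>
    intro i flag j z temp hm hi1 hi2 hfl hinv
    have hj : ¬ j < words.length := by omega
    rw [pvMatchLoop]
    simp only [hi2, if_pos, hj, if_neg, if_false]
    rw [pvLoopA]
    have : ¬ (j < words.length ∧ i < s.length) := by tauto
    simp only [this, dif_neg, if_false]
    right
    exact ⟨rfl, by omega⟩
  | succ m ih =>
    intro i flag j z temp hm hi1 hi2 hfl hinv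
    by_cases hj : j < words.length
    · have hguard : j < words.length ∧ i < s.length := ⟨hj, hi2⟩
      have hi0 : ¬ i = 0 := by omega
      rw [pvMatchLoop]
      simp only [hi2, if_pos, hj]
      by_cases hw : words.getD j "" = s.getD i ""
      · simp only [hw, if_pos]
        by_cases hlast : i = s.length - 1
        · -- full match: B returns some (j+1), A emits and restarts at z+1
          have hdone : ¬ i + 1 < s.length := by omega
          rw [pvMatchLoop]
          simp only [hdone, if_neg, if_false]
          rw [pvLoopA]
          rw [dif_pos hguard]
          simp only [hi0, if_neg, if_false]
          rw [if_pos hw, if_pos hlast]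
        · have hlt : i + 1 < s.length := by omega
          have := ih (i + 1) flag (j + 1) z temp (by omega) (by omega) hlt hfl (by omega)
          rw [pvLoopA]
          simp only [hguard, dif_pos, hi0, if_neg, if_false, hw, if_pos, hlast]
          exact this
      · simp only [hw, if_neg, if_false]
        by_cases hflag : flag = 0
        · -- unused skip: both consume a word
          have hc : 0 < i ∧ (decide (flag = 1)) = false := by
            constructor
            · omega
            · simp [hflag]
          simp only [hc, if_pos]
          have := ih i 1 (j + 1) z temp (by omega) hi1 hi2 (by omega) (by omega)
          rw [pvLoopA]
          simp only [hguard, dif_pos, hi0, if_neg, if_false, hw, hflag, if_pos]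
          simpa using this
        · -- skip used: both give up on this start
          have hflag1 : flag = 1 := by omega
          have hc : ¬ (0 < i ∧ (decide (flag = 1)) = false) := by simp [hflag1]
          simp only [hc, if_neg, if_false]
          rw [pvLoopA]
          simp only [hguard, dif_pos, hi0, if_neg, if_false, hw, hflag, if_false]
          left
          rfl
    · -- words exhausted mid-match
      rw [pvMatchLoop]
      simp only [hi2, if_pos, hj, if_neg, if_false]
      rw [pvLoopA]
      have : ¬ (j < words.length ∧ i < s.length) := by tauto
      simp only [this, dif_neg, if_false]
      right
      exact ⟨rfl, by omega⟩

-- main loop correspondence: A's scan started at j = z (i = 0) equals B's fold over starts z..n-1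
lemma pvLoopA_fold (words s : List String) (hs : s ≠ []) :
    ∀ (m z flag0 z0 : Nat) (temp : List String), words.length - z ≤ m → z ≤ words.length →
      pvLoopA words s 0 flag0 z z0 temp =
        (List.range' z (words.length - z)).foldl (pvStepB words s) temp := by
  have hslen : 0 < s.length := by
    cases s with
    | nil => exact absurd rfl hs
    | cons a l => simp
  intro m
  induction m with
  | zero =>
    intro z flag0 z0 temp hm hz
    have hz' : z = words.length := by omega
    rw [pvLoopA]
    have : ¬ (z < words.length ∧ 0 < s.length) := by omega
    simp only [this, dif_neg, if_false]
    rw [show words.length - z = 0 by omega]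
    rfl
  | succ m ih =>
    intro z flag0 z0 temp hm hz
    by_cases hzlt : z < words.length
    · have hguard : z < words.length ∧ 0 < s.length := ⟨hzlt, hslen⟩
      have hrange : List.range' z (words.length - z) = z :: List.range' (z + 1) (words.length - (z + 1)) := by
        rw [show words.length - z = (words.length - (z + 1)) + 1 by omega]
        rw [List.range'_succ]
      rw [hrange, List.foldl_cons]
      rw [pvLoopA, dif_pos hguard]
      simp only [reduceIte]
      by_cases hw : words.getD z "" = s.getD 0 ""
      · rw [if_pos hw]
        by_cases hone : (0 : Nat) = s.length - 1
        · -- one-word phrase: immediate emit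
          have hstep : pvStepB words s temp z =
              temp ++ [PySem.Str.join " " (PySem.List.slice words (some ((z : Nat) : Int)) (some ((z + 1 : Nat) : Int)))] := by
            rw [pvStepB, pvMatchLoop, if_pos hslen, if_pos hzlt, if_pos hw, pvMatchLoop]
            have h1 : ¬ (0 + 1 < s.length) := by omega
            rw [if_neg h1]
          rw [if_pos hone]
          rw [hstep]
          exact ih (z + 1) 0 z _ (by omega) (by omega)
        · rw [if_neg hone]
          have hlt1 : 1 < s.length := by omega
          have hml : pvMatchLoop words s z 0 false = pvMatchLoop words s (z + 1) 1 false := by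
            rw [pvMatchLoop, if_pos hslen, if_pos hzlt, if_pos hw]
          have hcorr := pvLoopA_matchLoop words s (words.length - (z + 1)) 1 0 (z + 1) z temp
            (by omega) (by omega) hlt1 (by omega) (by omega)
          rw [show (decide ((0 : Nat) = 1)) = false by simp] at hcorr
          cases hmatch : pvMatchLoop words s (z + 1) 1 false with
          | some k =>
            rw [hmatch] at hcorr
            simp only at hcorr
            rw [hcorr]
            have hstep : pvStepB words s temp z =
                temp ++ [PySem.Str.join " " (PySem.List.slice words (some ((z : Nat) : Int)) (some ((k : Nat) : Int)))] := by
              rw [pvStepB, hml, hmatch]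
            rw [hstep]
            exact ih (z + 1) 0 z _ (by omega) (by omega)
          | none =>
            rw [hmatch] at hcorr
            simp only at hcorr
            have hstep : pvStepB words s temp z = temp := by rw [pvStepB, hml, hmatch]
            rw [hstep]
            rcases hcorr with h | ⟨hdone, hshort⟩
            · rw [h]
              exact ih (z + 1) 0 z temp (by omega) (by omega)
            · rw [hdone]
              symm
              apply foldl_pvStepB_none
              intro z' hz'
              have hz'' := List.mem_range'.mp hz'
              apply pvMatchLoop_none_of_short
              · omega
              · omega
      · -- mismatch at start: A marks the flag and moves on, which is just the next start
        rw [if_neg hw]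
        have hstep : pvStepB words s temp z = temp := by
          rw [pvStepB, pvMatchLoop, if_pos hslen, if_pos hzlt, if_neg hw]
          simp
        rw [hstep]
        exact ih (z + 1) 1 z temp (by omega) (by omega)
    · rw [pvLoopA]
      have : ¬ (z < words.length ∧ 0 < s.length) := by omega
      simp only [this, dif_neg, if_false]
      rw [show words.length - z = 0 by omega]
      rfl

lemma pvPhrase_eq (words : List String) (p : String) (temp : List String) :
    pvLoopA words (PySem.Str.split₀ p) 0 0 0 0 temp =
      (if PySem.Str.split₀ p = [] then temp
       else (List.range words.length).foldl (pvStepB words (PySem.Str.split₀ p)) temp) := by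
  by_cases hs : PySem.Str.split₀ p = []
  · rw [if_pos hs, pvLoopA]
    have : ¬ ((0 : Nat) < words.length ∧ 0 < (PySem.Str.split₀ p).length) := by
      simp [hs]
    simp [this]
  · rw [if_neg hs]
    rw [pvLoopA_fold words _ hs words.length 0 0 0 temp (by omega) (by omega)]
    rw [List.range_eq_range']
    simp

lemma pvFoldl_build {α β : Type} (f g : α → List β) (h : ∀ x, f x = g x) :
    ∀ (l : List α) (acc : List (List β)),
      l.foldl (fun ans q => ans ++ [f q]) acc = l.foldl (fun ans q => ans ++ [g q]) acc := by
  intro l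
  induction l with
  | nil => intro acc; rfl
  | cons x xs ih =>
    intro acc
    simp only [List.foldl_cons, h x]
    exact ih _

-- ===== VERDICT (by name: the statement is the Claim_ definition above) =====
theorem phrasel_search_spec : Claim_equal_phrasel_search := by
  unfold Claim_equal_phrasel_search
  intro P Queries _
  unfold Spec_phrasel_search
  have hq : ∀ q : String,
      P.foldl (fun temp p => pvLoopA (PySem.Str.split₀ q) (PySem.Str.split₀ p) 0 0 0 0 temp) [] =
      P.foldl (fun temp p => if PySem.Str.split₀ p = [] then temp
        else (List.range (PySem.Str.split₀ q).length).foldl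
          (pvStepB (PySem.Str.split₀ q) (PySem.Str.split₀ p)) temp) [] := by
    intro q
    congr 1
    funext temp p
    exact pvPhrase_eq (PySem.Str.split₀ q) p temp
  show Queries.foldl (fun ans q => ans ++
      [P.foldl (fun temp p => pvLoopA (PySem.Str.split₀ q) (PySem.Str.split₀ p) 0 0 0 0 temp) []]) [] =
    Queries.foldl (fun ans q => ans ++
      [P.foldl (fun temp p => if PySem.Str.split₀ p = [] then temp
        else (List.range (PySem.Str.split₀ q).length).foldl
          (pvStepB (PySem.Str.split₀ q) (PySem.Str.split₀ p)) temp) []]) []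
  exact pvFoldl_build _ _ hq Queries []
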